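-- pv_equiv track=rewrite | github.com/syntalos/timing-validation | syntalos_timetest/ttutils.py | trim_by_times
-- ===== SOURCE A (Python) =====
-- def trim_by_times(x, y, time_start, time_end):
--     idx_start = -1
--     idx_end = -1
--     for i, v in enumerate(x):
--         if idx_start < 0 and v >= time_start:
--             idx_start = i
--         if idx_end < 0 and v >= time_end:
--             idx_end = i
--             break
--
--     if idx_start < 0 or idx_end < 0:
--         return x, y
--     return x[idx_start:idx_end], y[idx_start:idx_end]
-- ===== SOURCE B (Python) =====
-- def trim_by_times(x, y, time_start, time_end):
--     idx_end = next((i for i, v in enumerate(x) if v >= time_end), None)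
--     if idx_end is None:
--         return x, y
--     idx_start = next((i for i, v in enumerate(x[:idx_end + 1]) if v >= time_start), None)
--     if idx_start is None:
--         return x, y
--     return x[idx_start:idx_end], y[idx_start:idx_end]
-- ===== Notes on version B (the rewrite author's own statement) =====
-- stated objective: alternative
-- what changed: Replaces A's single combined scan with two-flag state and a break by two separate first-index searches: first the end index over the whole array, then the start index over only the prefix up to it, combined with early returns.
import Mathlib
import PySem

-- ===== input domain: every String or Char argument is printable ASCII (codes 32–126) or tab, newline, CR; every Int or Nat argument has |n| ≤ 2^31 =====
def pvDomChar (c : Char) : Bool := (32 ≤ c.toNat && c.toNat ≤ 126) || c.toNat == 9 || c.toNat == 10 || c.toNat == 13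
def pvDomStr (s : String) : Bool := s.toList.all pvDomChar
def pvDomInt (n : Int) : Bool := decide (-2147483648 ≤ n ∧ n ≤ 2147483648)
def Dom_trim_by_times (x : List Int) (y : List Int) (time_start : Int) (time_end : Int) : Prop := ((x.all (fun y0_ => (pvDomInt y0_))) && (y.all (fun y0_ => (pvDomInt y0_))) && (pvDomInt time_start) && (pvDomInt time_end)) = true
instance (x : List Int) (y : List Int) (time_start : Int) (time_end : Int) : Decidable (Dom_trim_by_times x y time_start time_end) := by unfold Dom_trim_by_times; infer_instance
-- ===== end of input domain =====

-- B replaces A's single combined scan (two-flag state, break) with two separate first-index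
-- searches: end index over the whole list, then start index over the prefix up to it (alternative decomposition).

-- ===== PORT A =====
-- the for-loop of A: counter i, state (idx_start, idx_end), with `break` when idx_end is set
def trimLoopA : List Int → Int → Int → Nat → Int → Int → Int × Int
  | [], _, _, _, s, e => (s, e)
  | v :: vs, ts, te, i, s, e =>
    let s' := if s < 0 ∧ ts ≤ v then (i : Int) else s
    if e < 0 ∧ te ≤ v then (s', (i : Int))
    else trimLoopA vs ts te (i + 1) s' e

def trim_by_times (x : List Int) (y : List Int) (time_start : Int) (time_end : Int) : List Int × List Int :=
  let p := trimLoopA x time_start time_end 0 (-1) (-1)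
  if p.1 < 0 ∨ p.2 < 0 then (x, y)
  else (PySem.List.slice x (some p.1) (some p.2), PySem.List.slice y (some p.1) (some p.2))

-- ===== PORT B =====
-- next((i for i, v in enumerate(l) if v >= t), None)
def firstGE : List Int → Int → Nat → Option Nat
  | [], _, _ => none
  | v :: vs, t, i => if t ≤ v then some i else firstGE vs t (i + 1)

def trim_by_times_alt (x : List Int) (y : List Int) (time_start : Int) (time_end : Int) : List Int × List Int :=
  match firstGE x time_end 0 with
  | none => (x, y)
  | some ie =>
    match firstGE (x.take (ie + 1)) time_start 0 with
    | none => (x, y)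
    | some is =>
      (PySem.List.slice x (some (is : Int)) (some (ie : Int)),
       PySem.List.slice y (some (is : Int)) (some (ie : Int)))

-- ===== PRECONDITION & SPEC =====
def Spec_trim_by_times (x : List Int) (y : List Int) (time_start : Int) (time_end : Int) (out : List Int × List Int) : Prop := out = trim_by_times_alt x y time_start time_end
instance (x : List Int) (y : List Int) (time_start : Int) (time_end : Int) (out : List Int × List Int) : Decidable (Spec_trim_by_times x y time_start time_end out) := by unfold Spec_trim_by_times; infer_instance

-- ===== CLAIM =====
def Claim_equal_trim_by_times : Prop := ∀ (x : List Int) (y : List Int) (time_start : Int) (time_end : Int), Dom_trim_by_times x y time_start time_end → Spec_trim_by_times x y time_start time_end (trim_by_times x y time_start time_end)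

-- ===== LEMMAS AND PROOFS =====

def toI : Option Nat → Int
  | none => -1
  | some i => (i : Int)

theorem firstGE_ge {xs : List Int} {t : Int} {k i : Nat} (h : firstGE xs t k = some i) : k ≤ i := by
  induction xs generalizing k with
  | nil => simp [firstGE] at h
  | cons v vs ih =>
    simp only [firstGE] at h
    split at h
    · cases h; exact Nat.le_refl _
    · exact Nat.le_of_succ_le (ih h)

theorem trimLoopA_pos (xs : List Int) (ts te : Int) (k : Nat) (s : Int) (hs : 0 ≤ s) :
    trimLoopA xs ts te k s (-1) = (s, toI (firstGE xs te k)) := by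
  induction xs generalizing k with
  | nil => simp [trimLoopA, firstGE, toI]
  | cons v vs ih =>
    simp only [trimLoopA, firstGE]
    have hns : ¬ s < 0 := by omega
    by_cases hte : te ≤ v
    · simp [hns, hte, toI]
    · simp [hns, hte, ih]

theorem trimLoopA_char (xs : List Int) (ts te : Int) (k : Nat) :
    trimLoopA xs ts te k (-1) (-1) =
      match firstGE xs te k with
      | none => (toI (firstGE xs ts k), -1)
      | some ie =>
        match firstGE xs ts k with
        | none => (-1, (ie : Int))
        | some is => if is ≤ ie then ((is : Int), (ie : Int)) else (-1, (ie : Int)) := by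
  induction xs generalizing k with
  | nil => simp [trimLoopA, firstGE, toI]
  | cons v vs ih =>
    simp only [trimLoopA, firstGE, show ((-1 : Int) < 0) = True from by simp, true_and]
    by_cases hts : ts ≤ v
    · by_cases hte : te ≤ v
      · simp [hts, hte]
      · simp only [hts, hte, if_true, if_false]
        rw [trimLoopA_pos _ _ _ _ _ (by exact_mod_cast Nat.zero_le k)]
        cases h : firstGE vs te (k + 1) with
        | none => simp [toI]
        | some ie =>
          have := firstGE_ge h
          simp only [toI]
          rw [if_pos (by omega)]
    · by_cases hte : te ≤ v
      · simp only [hts, hte, if_true, if_false]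
        cases h : firstGE vs ts (k + 1) with
        | none => rfl
        | some is =>
          have := firstGE_ge h
          simp only
          rw [if_neg (by omega)]
      · simp only [hts, hte, if_false]
        exact ih (k + 1)

theorem firstGE_take (xs : List Int) (t : Int) (n k : Nat) :
    firstGE (xs.take n) t k =
      match firstGE xs t k with
      | none => none
      | some i => if i < k + n then some i else none := by
  induction xs generalizing n k with
  | nil => simp [firstGE]
  | cons v vs ih =>
    cases n with
    | zero =>
      rw [List.take_zero]
      cases h : firstGE (v :: vs) t k with
      | none => simp [firstGE]
      | some i =>
        have := firstGE_ge h
        simp [firstGE]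
        omega
    | succ m =>
      rw [List.take_succ_cons]
      simp only [firstGE]
      by_cases hv : t ≤ v
      · simp [hv]
      · rw [if_neg hv, if_neg hv, ih]
        cases h : firstGE vs t (k + 1) with
        | none => rfl
        | some i =>
          simp only
          have : k + 1 + m = k + (m + 1) := by omega
          rw [this]

-- ===== VERDICT =====
theorem trim_by_times_spec : Claim_equal_trim_by_times := by
  intro x y ts te _
  unfold Spec_trim_by_times trim_by_times trim_by_times_alt
  rw [trimLoopA_char]
  cases hE : firstGE x te 0 with
  | none => simp
  | some ie =>
    simp only [firstGE_take]
    cases hS : firstGE x ts 0 with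
    | none => simp
    | some is =>
      by_cases hle : is ≤ ie
      · simp [hle]
      · simp [hle]
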